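-- pv_equiv track=rewrite | github.com/FarishaNA/Python | until237.py | even_until237
-- ===== SOURCE A (Python) =====
-- def even_until237(l1):
--     evn = []
--     for n in l1:
--         if n == 237:
--             break
--         elif not n % 2:
--             evn.append(n)
--     return evn
-- ===== SOURCE B (Python) =====
-- def even_until237(l1):
--     # staged: locate the first 237 by index search, slice the prefix, then filter
--     try:
--         prefix = l1[:l1.index(237)]
--     except ValueError:
--         prefix = l1
--     return list(filter(lambda n: n % 2 == 0, prefix))
-- ===== Notes on version B (the rewrite author's own statement) =====
-- stated objective: alternative
-- what changed: Replaces the break-driven single accumulation loop with staged passes: list.index locates the first 237, a slice materialises the prefix, and filter keeps the evens.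
import Mathlib
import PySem

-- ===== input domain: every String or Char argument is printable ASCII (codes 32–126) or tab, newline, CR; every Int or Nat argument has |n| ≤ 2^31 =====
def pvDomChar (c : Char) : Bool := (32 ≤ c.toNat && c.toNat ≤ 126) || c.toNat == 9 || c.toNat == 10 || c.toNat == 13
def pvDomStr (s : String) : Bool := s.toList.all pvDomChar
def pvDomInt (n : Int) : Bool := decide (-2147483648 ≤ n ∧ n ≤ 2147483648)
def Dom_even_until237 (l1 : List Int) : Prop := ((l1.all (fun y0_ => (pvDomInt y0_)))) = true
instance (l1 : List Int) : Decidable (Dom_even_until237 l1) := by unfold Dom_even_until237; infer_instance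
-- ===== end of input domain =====

-- B replaces A's break-driven accumulation loop with staged passes: index of the first 237, slice the prefix, filter the evens (alternative; same cost).


-- ===== PORT A =====
-- loop with break, accumulator evn built front-to-back; ported as the obvious structural recursion
def even_until237 (l1 : List Int) : List Int :=
  match l1 with
  | [] => []
  | n :: rest =>
    if n == 237 then []
    else if PySem.Int.mod n 2 == 0 then n :: even_until237 rest
    else even_until237 rest

-- ===== PORT B =====
-- B: l1.index(237) (ValueError → whole list), slice the prefix, filter evens
def even_until237_alt (l1 : List Int) : List Int :=
  let pre :=
    match PySem.List.index? l1 237 with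
    | some i => PySem.List.slice l1 none (some (i : Int))
    | none => l1
  pre.filter (fun n => PySem.Int.mod n 2 == 0)

-- ===== PRECONDITION & SPEC =====
def Spec_even_until237 (l1 : List Int) (out : List Int) : Prop := out = even_until237_alt l1
instance (l1 : List Int) (out : List Int) : Decidable (Spec_even_until237 l1 out) := by unfold Spec_even_until237; infer_instance

-- ===== CLAIM =====
def Claim_equal_even_until237 : Prop := ∀ (l1 : List Int), Dom_even_until237 l1 → Spec_even_until237 l1 (even_until237 l1)

-- ===== LEMMAS AND PROOFS =====
theorem even_until237_eq (l1 : List Int) : even_until237 l1 = even_until237_alt l1 := by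
  induction l1 with
  | nil => rfl
  | cons n rest ih =>
    by_cases h : n = 237
    · subst h
      unfold even_until237_alt
      rw [PySem.List.index?_cons_self]
      show even_until237 ((237:Int) :: rest) =
        (PySem.List.slice ((237:Int) :: rest) none (some ((0:Nat) : Int))).filter
          (fun n => PySem.Int.mod n 2 == 0)
      rw [PySem.List.slice_to_natCast]
      simp [even_until237]
    · have hidx : PySem.List.index? (n :: rest) 237 =
          (PySem.List.index? rest 237).map (· + 1) :=
        PySem.List.index?_cons_of_ne rest h
      unfold even_until237_alt
      rw [hidx]
      cases hr : PySem.List.index? rest 237 with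
      | none =>
        unfold even_until237_alt at ih
        rw [hr] at ih
        cases he : (PySem.Int.mod n 2 == 0) <;>
          simp_all [even_until237]
      | some i =>
        have hs : PySem.List.slice (n :: rest) none (some ((i : Int) + 1)) =
            n :: PySem.List.slice rest none (some (i : Int)) := by
          have h1 : ((i : Int) + 1) = ((i + 1 : Nat) : Int) := by push_cast; ring
          rw [h1, PySem.List.slice_to_natCast, PySem.List.slice_to_natCast]
          simp [List.take_succ_cons]
        unfold even_until237_alt at ih
        rw [hr] at ih
        cases he : (PySem.Int.mod n 2 == 0) <;>
          simp_all [even_until237]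

-- ===== VERDICT =====
theorem even_until237_spec : Claim_equal_even_until237 := by
  intro l1 _
  unfold Spec_even_until237
  exact even_until237_eq l1
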